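-- pv_equiv track=rewrite | github.com/wooko5/Algorithm_Test | Weekly Challenge_Test/W4_직업군 추천하기.py | solution
-- ===== SOURCE A (Python) =====
-- def solution(table, languages, preference):
--     answer = []
--
--     for string in table:
--         stringNew = string.split()
--         totalScore = 0
--
--         for i in range(1, len(stringNew)): # 6 - i == 진짜 점수
--             score = 6 - i
--             prefer = 0
--
--             if stringNew[i] in languages:
--                 idx = languages.index(stringNew[i])
--                 prefer = preference[idx]
--
--             totalScore += score * prefer
--         answer.append([totalScore, stringNew[0]])
--     answer = sorted(answer, key = lambda x : (-x[0], x[1]))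
--     return answer[0][1]
-- ===== SOURCE B (Python) =====
-- def solution(table, languages, preference):
--     pref = {}
--     for lang, p in zip(languages, preference):
--         pref.setdefault(lang, p)
--     best = None
--     for row in table:
--         toks = row.split()
--         name = toks[0]
--         total = sum((6 - i) * pref.get(tok, 0) for i, tok in enumerate(toks[1:], 1))
--         if best is None or total > best[0] or (total == best[0] and name < best[1]):
--             best = (total, name)
--     return best[1]
-- ===== Notes on version B (the rewrite author's own statement) =====
-- stated objective: faster
-- what changed: B precomputes a language->preference dict (zip + setdefault so the first occurrence wins, like list.index) and selects the best job in a single pass with a strict (score, name) update, instead of A's per-token linear scans of languages plus build-list-then-sort by (-score, name).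
import Mathlib
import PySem

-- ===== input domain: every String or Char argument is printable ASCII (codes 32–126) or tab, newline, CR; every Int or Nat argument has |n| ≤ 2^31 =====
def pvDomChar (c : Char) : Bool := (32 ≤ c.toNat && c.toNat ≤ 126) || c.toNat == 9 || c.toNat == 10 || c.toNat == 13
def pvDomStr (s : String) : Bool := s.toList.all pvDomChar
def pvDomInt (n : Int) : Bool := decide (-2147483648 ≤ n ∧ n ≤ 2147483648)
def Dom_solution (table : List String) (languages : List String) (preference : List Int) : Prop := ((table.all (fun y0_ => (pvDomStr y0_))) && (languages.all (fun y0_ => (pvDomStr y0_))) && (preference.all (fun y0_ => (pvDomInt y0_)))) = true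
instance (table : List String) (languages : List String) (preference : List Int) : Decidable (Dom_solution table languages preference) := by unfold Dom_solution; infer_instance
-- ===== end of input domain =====

-- B replaces A's build-score-list-then-sort-by-(-score,name) with a first-preference dict
-- (zip + setdefault, so repeated languages keep their first preference like list.index does)
-- and a single-pass running best with a strict lexicographic update; same return value.

-- ===== PORT A =====
def solution (table : List String) (languages : List String) (preference : List Int) : String :=
  let answer : List (Int × String) :=
    table.foldl (fun acc string =>
      let stringNew := PySem.Str.split₀ string
      let totalScore :=
        (PySem.List.pyRange 1 (stringNew.length : Int)).foldl (fun t i =>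
          let score : Int := 6 - i
          let prefer : Int :=
            if PySem.List.pyGetD stringNew i "" ∈ languages then
              PySem.List.pyGetD preference
                (((PySem.List.index? languages (PySem.List.pyGetD stringNew i "")).getD 0 : Nat) : Int) 0
            else 0
          t + score * prefer) 0
      acc ++ [(totalScore, PySem.List.pyGetD stringNew 0 "")]) []
  let answerSorted := PySem.List.sorted2 answer (fun x => -x.1) (fun x => x.2)
  (PySem.List.pyGetD answerSorted 0 (0, "")).2

-- ===== PORT B =====
def solution_alt (table : List String) (languages : List String) (preference : List Int) : String :=
  let pref : PySem.Dict String Int :=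
    (languages.zip preference).foldl (fun d p => d.setdefault p.1 p.2) PySem.Dict.empty
  let best :=
    table.foldl (fun (best : Option (Int × String)) row =>
      let toks := PySem.Str.split₀ row
      let name := PySem.List.pyGetD toks 0 ""
      let total := ((PySem.List.enumerate (PySem.List.slice toks (some 1) none) 1).map
          (fun p => (6 - p.1) * pref.getD p.2 0)).sum
      match best with
      | none => some (total, name)
      | some b => if total > b.1 ∨ (total = b.1 ∧ name < b.2) then some (total, name) else some b)
      none
  match best with
  | some b => b.2
  | none => ""

-- ===== PRECONDITION & SPEC =====
-- Pre_ excludes exactly the inputs on which A raises: an empty table or a whitespace-only row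
-- (IndexError on [0]), and a scored token found in languages at an index ≥ len(preference)
-- (IndexError on preference[idx]).
def Pre_solution (table : List String) (languages : List String) (preference : List Int) : Prop :=
  table ≠ [] ∧ ∀ s ∈ table, PySem.Str.split₀ s ≠ [] ∧
    ∀ tok ∈ (PySem.Str.split₀ s).drop 1, tok ∈ languages →
      List.idxOf tok languages < preference.length
instance (table : List String) (languages : List String) (preference : List Int) : Decidable (Pre_solution table languages preference) := by unfold Pre_solution; infer_instance

def pvWitness_solution : List String × List String × List Int :=
  (["jaeho python cpp", "dev java"], ["python", "java"], [4, 3])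

def Spec_solution (table : List String) (languages : List String) (preference : List Int) (out : String) : Prop := out = solution_alt table languages preference
instance (table : List String) (languages : List String) (preference : List Int) (out : String) : Decidable (Spec_solution table languages preference out) := by unfold Spec_solution; infer_instance

-- ===== CLAIM (what is proved, stated in full; the proofs are below) =====
def Claim_equal_solution : Prop := ∀ (table : List String) (languages : List String) (preference : List Int), Dom_solution table languages preference → Pre_solution table languages preference → Spec_solution table languages preference (solution table languages preference)

-- ===== LEMMAS AND PROOFS =====

-- The dict B builds: first occurrence of each language wins (setdefault), keys zipped with preference.
def pvPrefDict (languages : List String) (preference : List Int) : PySem.Dict String Int :=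
  (languages.zip preference).foldl (fun d p => d.setdefault p.1 p.2) PySem.Dict.empty

-- B's per-row value (score, name); A's rows are proved equal to it under Pre_.
def pvRow (languages : List String) (preference : List Int) (row : String) : Int × String :=
  let toks := PySem.Str.split₀ row
  (((PySem.List.enumerate (PySem.List.slice toks (some 1) none) 1).map
      (fun p => (6 - p.1) * (pvPrefDict languages preference).getD p.2 0)).sum,
   PySem.List.pyGetD toks 0 "")

-- lookup through a chain of setdefaults = the earlier dict first, then the first match in the list
lemma foldl_setdefault_get? (ps : List (String × Int)) : ∀ (d : PySem.Dict String Int) (k : String),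
    (ps.foldl (fun d p => d.setdefault p.1 p.2) d).get? k = (d.get? k).or (List.lookup k ps) := by
  induction ps with
  | nil => intro d k; simp
  | cons hd tl ih =>
    intro d k
    simp only [List.foldl_cons, ih, List.lookup]
    by_cases hk : k = hd.1
    · rw [hk, PySem.Dict.get?_setdefault_self]
      cases h : d.get? hd.1 <;> simp
    · rw [PySem.Dict.get?_setdefault_of_ne d hd.2 hk]
      have hb : (k == hd.1) = false := by simp [hk]
      simp [hb]

-- first match of a key in zip(langs, prefs) = prefs[langs.index(key)]
lemma lookup_zip (langs : List String) : ∀ (prefs : List Int) (k : String),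
    k ∈ langs → List.idxOf k langs < prefs.length →
    List.lookup k (langs.zip prefs) = some (prefs.getD (List.idxOf k langs) 0) := by
  induction langs with
  | nil => simp
  | cons l ls ih =>
    intro prefs k hm hlt
    cases prefs with
    | nil => simp at hlt
    | cons p ps =>
      by_cases hk : k = l
      · subst hk; simp [List.idxOf_cons_self]
      · have hm' : k ∈ ls := by simpa [hk] using hm
        have hx : List.idxOf k (l :: ls) = List.idxOf k ls + 1 := by
          simp [Ne.symm hk]
        have hlt' : List.idxOf k ls < ps.length := by
          rw [hx] at hlt; simpa using hlt
        have hb : (k == l) = false := by simp [hk]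
        simp only [List.zip_cons_cons, List.lookup, hb, hx]
        simpa using ih ps k hm' hlt'

lemma lookup_zip_none (langs : List String) : ∀ (prefs : List Int) (k : String), k ∉ langs →
    List.lookup k (langs.zip prefs) = none := by
  induction langs with
  | nil => simp
  | cons l ls ih =>
    intro prefs k hm
    cases prefs with
    | nil => simp
    | cons p ps =>
      have h1 : k ≠ l := by rintro rfl; simp at hm
      have hb : (k == l) = false := by simp [h1]
      simp only [List.zip_cons_cons, List.lookup, hb]
      exact ih ps k (by intro h; exact hm (List.mem_cons_of_mem _ h))

lemma idxOf?_of_mem (langs : List String) (tok : String) : tok ∈ langs →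
    List.idxOf? tok langs = some (List.idxOf tok langs) := by
  induction langs with
  | nil => simp
  | cons l ls ih =>
    intro hm
    by_cases hk : tok = l
    · subst hk; simp [List.idxOf?_cons, List.idxOf_cons_self]
    · have hm' : tok ∈ ls := by simpa [hk] using hm
      have hb : (l == tok) = false := by simp [Ne.symm hk]
      simp [List.idxOf?_cons, List.idxOf_cons, hb, ih hm']

-- A's prefer computation equals B's dict lookup (given Pre_'s index bound)
lemma prefer_eq (langs : List String) (prefs : List Int) (tok : String)
    (h : tok ∈ langs → List.idxOf tok langs < prefs.length) :
    (if tok ∈ langs then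
        PySem.List.pyGetD prefs (((PySem.List.index? langs tok).getD 0 : Nat) : Int) 0
      else 0) = (pvPrefDict langs prefs).getD tok 0 := by
  have hget : (pvPrefDict langs prefs).get? tok = List.lookup tok (langs.zip prefs) := by
    rw [pvPrefDict, foldl_setdefault_get?]
    simp
  rw [PySem.Dict.getD, hget]
  by_cases hm : tok ∈ langs
  · rw [lookup_zip langs prefs tok hm (h hm)]
    rw [PySem.List.index?_eq_idxOf?, idxOf?_of_mem langs tok hm]
    simp [hm, PySem.List.pyGetD_natCast]
  · rw [lookup_zip_none langs prefs tok hm]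
    simp [hm]

-- A's index loop over the whole row = a sum over enumerate of the suffix
lemma pvInnerSum (g : String → Int) (ys : List String) : ∀ (pre : List String) (acc : Int),
    (PySem.List.pyRange (pre.length : Int) ((pre.length : Int) + (ys.length : Int))).foldl
      (fun t i => t + (6 - i) * g (PySem.List.pyGetD (pre ++ ys) i "")) acc
    = acc + ((PySem.List.enumerate ys (pre.length : Int)).map (fun p => (6 - p.1) * g p.2)).sum := by
  induction ys with
  | nil =>
    intro pre acc
    rw [PySem.List.pyRange_one_eq_nil (by simp)]
    simp [PySem.List.enumerate]
  | cons y ys ih =>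
    intro pre acc
    rw [PySem.List.pyRange_one_cons (by simp)]
    rw [List.foldl_cons]
    have hy : PySem.List.pyGetD (pre ++ y :: ys) (pre.length : Int) "" = y := by
      rw [PySem.List.pyGetD_natCast]
      simp [List.getD_eq_getElem?_getD]
    rw [hy]
    have h2 := ih (pre ++ [y]) (acc + (6 - (pre.length : Int)) * g y)
    simp only [List.length_append, List.length_cons, List.length_nil] at h2 ⊢
    push_cast at h2 ⊢
    rw [show pre ++ [y] ++ ys = pre ++ y :: ys by simp] at h2
    rw [show (pre.length : Int) + 1 + (ys.length : Int) = (pre.length : Int) + ((ys.length : Int) + 1) by ring] at h2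
    rw [h2, PySem.List.enumerate_cons]
    simp
    ring

-- per-row agreement under Pre_'s row condition
lemma row_eq (langs : List String) (prefs : List Int) (s : String)
    (htok : ∀ tok ∈ (PySem.Str.split₀ s).drop 1, tok ∈ langs →
      List.idxOf tok langs < prefs.length) :
    ((PySem.List.pyRange 1 ((PySem.Str.split₀ s).length : Int)).foldl (fun t i =>
        t + (6 - i) * (if PySem.List.pyGetD (PySem.Str.split₀ s) i "" ∈ langs then
              PySem.List.pyGetD prefs
                (((PySem.List.index? langs (PySem.List.pyGetD (PySem.Str.split₀ s) i "")).getD 0 : Nat) : Int) 0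
            else 0)) 0,
      PySem.List.pyGetD (PySem.Str.split₀ s) 0 "") = pvRow langs prefs s := by
  cases hts : PySem.Str.split₀ s with
  | nil =>
    rw [pvRow, hts]
    simp [PySem.List.pyRange_one_eq_nil, PySem.List.slice, PySem.List.pyGetD]
  | cons t0 ys =>
    rw [hts] at htok
    simp only [List.drop_succ_cons, List.drop_zero] at htok
    rw [pvRow, hts]
    have hA := pvInnerSum
      (fun tok => if tok ∈ langs then
          PySem.List.pyGetD prefs (((PySem.List.index? langs tok).getD 0 : Nat) : Int) 0 else 0)
      ys [t0] 0
    simp only [List.length_cons, List.length_nil, List.singleton_append] at hA ⊢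
    push_cast at hA ⊢
    rw [show (1 : Int) + (ys.length : Int) = (ys.length : Int) + 1 by ring] at hA
    rw [hA]
    rw [PySem.List.slice_from _ (by norm_num)]
    simp only [Int.toNat_one, List.drop_succ_cons, List.drop_zero, zero_add]
    simp only [Prod.mk.injEq]
    refine ⟨?_, trivial⟩
    apply congrArg
    apply List.map_congr_left
    intro p hp
    rcases (PySem.List.mem_enumerate_iff _ _ _).mp hp with ⟨k, hk, rfl⟩
    have hmem : ys[k] ∈ ys := List.getElem_mem hk
    have := prefer_eq langs prefs ys[k] (htok ys[k] hmem)
    rw [this]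

-- head of A's stable insertion sort = a running first-minimum fold
lemma head_foldl_insertBy (lt : (Int × String) → (Int × String) → Bool) (xs : List (Int × String)) :
    ∀ (a : Int × String) (acc : List (Int × String)) (d : Int × String),
    PySem.List.pyGetD (xs.foldl (fun acc x => PySem.List.insertBy lt x acc) (a :: acc)) 0 d
    = xs.foldl (fun m x => if lt x m then x else m) a := by
  induction xs with
  | nil =>
    intro a acc d
    simp [PySem.List.pyGetD_ofNat']
  | cons x xs ih =>
    intro a acc d
    rw [List.foldl_cons, List.foldl_cons]
    have hstep : PySem.List.insertBy lt x (a :: acc)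
        = (if lt x a then x else a) :: (if lt x a then a :: acc else PySem.List.insertBy lt x acc) := by
      by_cases h : lt x a <;> simp [PySem.List.insertBy, h]
    rw [hstep]
    by_cases h : lt x a <;> simp only [h, if_true, ih]

-- B's per-step update of the running best
def pvPick2 (o : Option (Int × String)) (r : Int × String) : Option (Int × String) :=
  match o with
  | none => some r
  | some b => if r.1 > b.1 ∨ (r.1 = b.1 ∧ r.2 < b.2) then some r else some b

-- B's option-valued running best, after the first row, is a plain running fold
lemma foldl_pvPick2 (rs : List (Int × String)) : ∀ (r0 : Int × String),
    rs.foldl pvPick2 (some r0)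
    = some (rs.foldl (fun m r => if r.1 > m.1 ∨ (r.1 = m.1 ∧ r.2 < m.2) then r else m) r0) := by
  induction rs with
  | nil => intro r0; rfl
  | cons r rs ih =>
    intro r0
    simp only [List.foldl_cons]
    have hv : pvPick2 (some r0) r
        = if r.1 > r0.1 ∨ (r.1 = r0.1 ∧ r.2 < r0.2) then some r else some r0 := rfl
    by_cases h : r.1 > r0.1 ∨ (r.1 = r0.1 ∧ r.2 < r0.2)
    · rw [hv, if_pos h, if_pos h, ih]
    · rw [hv, if_neg h, if_neg h, ih]

-- head of A's sorted2 = B's running best over the same rows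
lemma sorted2_head (r0 : Int × String) (rs : List (Int × String)) (d : Int × String) :
    (PySem.List.pyGetD
        (PySem.List.sorted2 (r0 :: rs) (fun x => -x.1) (fun x => x.2)) 0 d)
    = rs.foldl (fun m r => if r.1 > m.1 ∨ (r.1 = m.1 ∧ r.2 < m.2) then r else m) r0 := by
  have h0 : PySem.List.sorted2 (r0 :: rs) (fun x => -x.1) (fun x => x.2)
      = rs.foldl (fun acc x => PySem.List.insertBy
          (fun a b => decide (-a.1 < -b.1) || !decide (-b.1 < -a.1) && decide (a.2 < b.2)) x acc)
          [r0] := rfl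
  rw [h0, head_foldl_insertBy]
  congr 1
  funext m r
  rcases lt_trichotomy m.1 r.1 with h | h | h
  · have ha : -r.1 < -m.1 := by omega
    simp [ha, h]
  · simp [h]
  · have ha : ¬(-r.1 < -m.1) := by omega
    have hb : -m.1 < -r.1 := by omega
    have hc : ¬(r.1 > m.1) := by omega
    have hd : r.1 ≠ m.1 := by omega
    simp [ha, hb, hc, hd]

lemma solution_eq (table langs : List String) (prefs : List Int)
    (hpre : Pre_solution table langs prefs) :
    solution table langs prefs = solution_alt table langs prefs := by
  obtain ⟨hne, hrows⟩ := hpre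
  have h1 : solution table langs prefs =
      (PySem.List.pyGetD
        (PySem.List.sorted2
          (table.foldl (fun acc string =>
            acc ++ [((PySem.List.pyRange 1 ((PySem.Str.split₀ string).length : Int)).foldl (fun t i =>
                t + (6 - i) * (if PySem.List.pyGetD (PySem.Str.split₀ string) i "" ∈ langs then
                      PySem.List.pyGetD prefs
                        (((PySem.List.index? langs (PySem.List.pyGetD (PySem.Str.split₀ string) i "")).getD 0 : Nat) : Int) 0
                    else 0)) 0,
              PySem.List.pyGetD (PySem.Str.split₀ string) 0 "")]) [])
          (fun x => -x.1) (fun x => x.2)) 0 (0, "")).2 := rfl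
  have h2 : solution_alt table langs prefs =
      (match table.foldl (fun best row => pvPick2 best (pvRow langs prefs row)) none with
       | some b => b.2
       | none => "") := rfl
  rw [h1, h2, PySem.List.foldl_append_singleton_eq_map, List.nil_append]
  rw [List.map_congr_left (fun s hs => row_eq langs prefs s ((hrows s hs).2))]
  rw [← List.foldl_map]
  cases table with
  | nil => exact absurd rfl hne
  | cons t ts =>
    rw [List.map_cons, List.foldl_cons]
    have hstart : pvPick2 none (pvRow langs prefs t) = some (pvRow langs prefs t) := rfl
    rw [hstart, foldl_pvPick2, sorted2_head]

-- ===== VERDICT (by name: the statement is the Claim_ definition above) =====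
theorem solution_spec : Claim_equal_solution := by
  intro table languages preference _ hpre
  exact solution_eq table languages preference hpre
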